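-- pv_equiv track=rewrite | github.com/CreeperHK/Screen_Mahjong | utils.py | compose_gen_kz
-- ===== SOURCE A (Python) =====
-- def compose_gen_kz(kz) -> list:
--     mycompose = []
--
--     def myrecursion(fr=None, br=None, cr=None):
--         if fr is not None and br is not None and cr is not None:
--             mycompose.append([kz - fr, br, cr, fr - br - cr])
--             return
--         elif fr is not None and br is not None:
--             for k in range(0, fr - br + 1):
--                 myrecursion(fr, br, k)
--         else:
--             for k in range(0, fr + 1):
--                 myrecursion(fr, k)
--
--     for x in range(kz + 1):
--         fr = kz - x
--         myrecursion(x)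
--     return mycompose
-- ===== SOURCE B (Python) =====
-- def compose_gen_kz(kz) -> list:
--     # Simpler: three explicit nested loops instead of a stateful nested recursion.
--     return [[kz - x, b, c, x - b - c]
--             for x in range(kz + 1)
--             for b in range(x + 1)
--             for c in range(x - b + 1)]
-- ===== Notes on version B (the rewrite author's own statement) =====
-- stated objective: simpler
-- what changed: Replaced the mutually-staged recursive helper mutating an outer list with a single triple-nested comprehension building the list directly.
import Mathlib
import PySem

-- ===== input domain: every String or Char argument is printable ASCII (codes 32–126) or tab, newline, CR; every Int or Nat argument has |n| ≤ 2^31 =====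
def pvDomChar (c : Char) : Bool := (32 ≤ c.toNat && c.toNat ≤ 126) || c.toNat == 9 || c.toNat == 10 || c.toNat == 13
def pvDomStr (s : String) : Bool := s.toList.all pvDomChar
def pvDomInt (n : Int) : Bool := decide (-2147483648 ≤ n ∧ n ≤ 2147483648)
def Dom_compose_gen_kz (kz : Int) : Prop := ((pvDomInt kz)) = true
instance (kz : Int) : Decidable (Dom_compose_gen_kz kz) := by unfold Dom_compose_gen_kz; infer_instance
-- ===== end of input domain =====

-- B replaces the stateful nested recursion with one triple-nested comprehension (simpler; same values, same order).
-- ===== PORT A =====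
-- myrecursion's three branches (cr known / br known / only fr known), accumulator instead of the mutated outer list
def myrec3 (kz fr br cr : Int) : List (List Int) := [[kz - fr, br, cr, fr - br - cr]]
def myrec2 (kz fr br : Int) : List (List Int) :=
  (PySem.List.pyRange 0 (fr - br + 1) 1).foldl (fun acc k => acc ++ myrec3 kz fr br k) []
def myrec1 (kz fr : Int) : List (List Int) :=
  (PySem.List.pyRange 0 (fr + 1) 1).foldl (fun acc k => acc ++ myrec2 kz fr k) []
def compose_gen_kz (kz : Int) : List (List Int) :=
  (PySem.List.pyRange 0 (kz + 1) 1).foldl (fun acc x => acc ++ myrec1 kz x) []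

-- ===== PORT B =====
def compose_gen_kz_alt (kz : Int) : List (List Int) :=
  (PySem.List.pyRange 0 (kz + 1) 1).flatMap (fun x =>
    (PySem.List.pyRange 0 (x + 1) 1).flatMap (fun b =>
      (PySem.List.pyRange 0 (x - b + 1) 1).map (fun c => [kz - x, b, c, x - b - c])))

-- ===== PRECONDITION & SPEC =====
def Spec_compose_gen_kz (kz : Int) (out : List (List Int)) : Prop := out = compose_gen_kz_alt kz
instance (kz : Int) (out : List (List Int)) : Decidable (Spec_compose_gen_kz kz out) := by unfold Spec_compose_gen_kz; infer_instance

-- ===== CLAIM (what is proved, stated in full; the proofs are below) =====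
def Claim_equal_compose_gen_kz : Prop := ∀ (kz : Int), Dom_compose_gen_kz kz → Spec_compose_gen_kz kz (compose_gen_kz kz)

-- ===== LEMMAS AND PROOFS =====

-- ===== VERDICT (by name: the statement is the Claim_ definition above) =====
theorem flatten_map_single {α β : Type} (f : α → β) (l : List α) :
    (l.map (fun x => [f x])).flatten = l.map f := by
  induction l with
  | nil => rfl
  | cons a t ih => simp [ih]

theorem myrec2_eq (kz fr br : Int) :
    myrec2 kz fr br = (PySem.List.pyRange 0 (fr - br + 1) 1).map (fun c => [kz - fr, br, c, fr - br - c]) := by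
  simp [myrec2, myrec3, flatten_map_single]

theorem myrec1_eq (kz fr : Int) :
    myrec1 kz fr = (PySem.List.pyRange 0 (fr + 1) 1).flatMap (fun b =>
      (PySem.List.pyRange 0 (fr - b + 1) 1).map (fun c => [kz - fr, b, c, fr - b - c])) := by
  simp [myrec1, myrec2_eq, List.flatMap_def]

theorem compose_gen_kz_spec : Claim_equal_compose_gen_kz := by
  intro kz _
  unfold Spec_compose_gen_kz compose_gen_kz compose_gen_kz_alt
  simp [myrec1_eq, List.flatMap_def]
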